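-- pv_equiv track=rewrite | github.com/imdrewsf/Hubitat_Tile_Mover | hubitat_tile_mover/ops_spacing.py | _axis_map_set_from_intervals
-- ===== SOURCE A (Python) =====
-- from typing import Any, Dict, List, Tuple, DefaultDict
--
-- def _components_1d(intervals: List[Tuple[int, int]]) -> List[List[int]]:
--     """Connected components of overlapping inclusive intervals. Returns lists of indices."""
--     order = sorted(range(len(intervals)), key=lambda i: (intervals[i][0], intervals[i][1], i))
--     comps: List[List[int]] = []
--     cur: List[int] = []
--     cur_end = None
--     for i in order:
--         a, b = intervals[i]
--         if cur_end is None: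
--             cur = [i]
--             cur_end = b
--             continue
--         if a <= cur_end:
--             cur.append(i)
--             cur_end = max(cur_end, b)
--         else:
--             comps.append(cur)
--             cur = [i]
--             cur_end = b
--     if cur_end is not None:
--         comps.append(cur)
--     return comps
--
-- def _axis_map_set_from_intervals(starts: List[int], end_by_start: Dict[int, int], gap: int) -> Dict[int, int]:
--     """Map old_start -> new_start like _axis_map_from_intervals, but set spacing to a fixed gap.
--
--     Components are defined the same way (overlap-components of [start..end_by_start[start]]).
--     Between consecutive components:
--         new_gap = gap
--         next_new_base = prev_new_end + 1 + new_gap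
--
--     gap must be >= 0.
--     """
--     if gap < 0:
--         raise ValueError(f"gap must be >= 0, got: {gap}")
--     if not starts:
--         return {}
--     if len(starts) == 1:
--         return {starts[0]: starts[0]}
--
--     intervals = [(s, end_by_start[s]) for s in starts]
--     comps = _components_1d(intervals)
--     comp_starts = [[starts[i] for i in comp] for comp in comps]
--
--     comp_info = []
--     for ss in comp_starts:
--         base = min(ss)
--         offsets = {s: s - base for s in ss}
--         end = max(end_by_start[s] for s in ss)
--         comp_info.append((base, end, ss, offsets))
--     comp_info.sort(key=lambda x: x[0])
--
--     base_map: Dict[int, int] = {}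
--     base0, end0, _, _ = comp_info[0]
--     base_map[base0] = base0
--     prev_new_end = end0
--
--     for base, end, ss, offsets in comp_info[1:]:
--         new_base = prev_new_end + 1 + gap
--         base_map[base] = new_base
--         span = end - base
--         prev_new_end = new_base + span
--
--     out: Dict[int, int] = {}
--     for base, end, ss, offsets in comp_info:
--         nb = base_map[base]
--         for s in ss:
--             out[s] = nb + offsets[s]
--     return out
-- ===== SOURCE B (Python) =====
-- def _axis_map_set_from_intervals(starts, end_by_start, gap):
--     """Single-pass rewrite: sort once, sweep components and emit new starts directly."""
--     if gap < 0:
--         raise ValueError(f"gap must be >= 0, got: {gap}")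
--     if len(starts) == 1:
--         return {starts[0]: starts[0]}
--     order = sorted(range(len(starts)),
--                    key=lambda i: (starts[i], end_by_start[starts[i]], i))
--     out = {}
--     comp_base = new_base = cur_end = None
--     for i in order:
--         s = starts[i]
--         e = end_by_start[s]
--         if cur_end is None:
--             comp_base, new_base, cur_end = s, s, e
--         elif s > cur_end:
--             new_base = new_base + (cur_end - comp_base) + 1 + gap
--             comp_base, cur_end = s, e
--         else:
--             cur_end = max(cur_end, e)
--         out[s] = new_base + (s - comp_base)
--     return out
-- ===== Notes on version B (the rewrite author's own statement) =====
-- stated objective: simpler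
-- what changed: Replaces A's four-phase pipeline (component index lists from a helper, comp_starts, comp_info tuples with per-component min/max/offset dicts, a base_map dict, and a final rendering loop) by one sort plus a single sweep that emits each new start directly while tracking only the current component's old base, new base and running end.
import Mathlib
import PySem

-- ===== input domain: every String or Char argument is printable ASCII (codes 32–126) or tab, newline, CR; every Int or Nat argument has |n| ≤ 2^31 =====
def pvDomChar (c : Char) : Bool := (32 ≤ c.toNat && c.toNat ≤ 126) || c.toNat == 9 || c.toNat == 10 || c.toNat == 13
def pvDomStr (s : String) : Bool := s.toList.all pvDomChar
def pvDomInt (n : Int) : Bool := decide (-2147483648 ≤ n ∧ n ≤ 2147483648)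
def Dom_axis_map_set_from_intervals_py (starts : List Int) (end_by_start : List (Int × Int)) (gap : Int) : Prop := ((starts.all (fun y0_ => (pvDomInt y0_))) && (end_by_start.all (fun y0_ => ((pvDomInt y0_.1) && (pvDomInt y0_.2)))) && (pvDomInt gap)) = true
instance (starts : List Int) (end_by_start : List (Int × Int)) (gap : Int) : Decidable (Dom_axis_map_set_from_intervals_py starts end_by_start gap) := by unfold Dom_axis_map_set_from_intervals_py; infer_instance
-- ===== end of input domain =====

-- B is a simpler decomposition of A: one sort plus a single sweep with three scalars of
-- state, instead of A's component-index helper, comp_info tuples, base_map dict and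
-- rendering loop.  Equality proved on Pre_ (A raises outside it).

-- ===== PORT A =====

-- end_by_start[s]  (dict subscript; KeyError = none, excluded by Pre_, default 0 here)
def ebsGet (ebs : List (Int × Int)) (s : Int) : Int :=
  (((ebs.find? (fun p => p.1 == s)).map (fun p => p.2)).getD 0)

-- the body of _components_1d's for-loop
def compStep (intervals : List (Int × Int)) (st : List (List Nat) × List Nat × Option Int)
    (i : Nat) : List (List Nat) × List Nat × Option Int :=
  let a := (intervals.getD i (0, 0)).1
  let b := (intervals.getD i (0, 0)).2
  match st.2.2 with
  | none => (st.1, [i], some b)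
  | some ce =>
    if a ≤ ce then (st.1, st.2.1 ++ [i], some (max ce b))
    else (st.1 ++ [st.2.1], [i], some b)

-- _components_1d: sort indices by (interval, index) — the trailing index tiebreak is
-- exactly the stability of the sort — then one fold grouping overlapping intervals.
def components1d (intervals : List (Int × Int)) : List (List Nat) :=
  let order := PySem.List.sorted2 (List.range intervals.length)
      (fun i => (intervals.getD i (0, 0)).1) (fun i => (intervals.getD i (0, 0)).2) false
  let st := order.foldl (compStep intervals) ([], [], none)
  match st.2.2 with
  | none => st.1
  | some _ => st.1 ++ [st.2.1]

-- one comp_info entry: (base, end, ss, offsets)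
def infoFun (ebs : List (Int × Int)) (ss : List Int) : Int × Int × List Int × PySem.Dict Int Int :=
  let base := (PySem.List.min? ss (fun y => y)).getD 0
  let offsets := ss.foldl (fun d s => d.insert s (s - base)) PySem.Dict.empty
  let e := (PySem.List.max? (ss.map (fun s => ebsGet ebs s)) (fun y => y)).getD 0
  (base, e, ss, offsets)

-- the body of the base_map for-loop (state: (base_map, prev_new_end))
def bmStep (gap : Int) (st : PySem.Dict Int Int × Int)
    (info : Int × Int × List Int × PySem.Dict Int Int) : PySem.Dict Int Int × Int :=
  let newBase := st.2 + 1 + gap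
  (st.1.insert info.1 newBase, newBase + (info.2.1 - info.1))

-- the body of the final rendering for-loop
def renderStep (baseMap : PySem.Dict Int Int) (out : PySem.Dict Int Int)
    (info : Int × Int × List Int × PySem.Dict Int Int) : PySem.Dict Int Int :=
  info.2.2.1.foldl (fun out s => out.insert s (baseMap.getD info.1 0 + info.2.2.2.getD s 0)) out

def axis_map_set_from_intervals_py (starts : List Int) (end_by_start : List (Int × Int)) (gap : Int) : List (Int × Int) :=
  if gap < 0 then []                                    -- ValueError; excluded by Pre_
  else if starts.isEmpty then []
  else if starts.length = 1 then [(starts.getD 0 0, starts.getD 0 0)]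
  else
    let intervals := starts.map (fun s => (s, ebsGet end_by_start s))
    let comps := components1d intervals
    let compStarts := comps.map (fun comp => comp.map (fun i => starts.getD i 0))
    let compInfo := compStarts.foldl (fun acc ss => acc ++ [infoFun end_by_start ss]) []
    let compInfoS := PySem.List.sorted compInfo (fun x => x.1) false
    match compInfoS with
    | [] => []                                          -- unreachable: starts ≠ []
    | info0 :: rest =>
      let baseMap :=
        (rest.foldl (bmStep gap) (PySem.Dict.empty.insert info0.1 info0.1, info0.2.1)).1
      let out := compInfoS.foldl (renderStep baseMap) PySem.Dict.empty
      out.items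

-- ===== PORT B =====

-- the body of the sweep loop (state: (out, Option (comp_base, new_base, cur_end)))
def sweepStep (starts : List Int) (ebs : List (Int × Int)) (gap : Int)
    (st : PySem.Dict Int Int × Option (Int × Int × Int)) (i : Nat) :
    PySem.Dict Int Int × Option (Int × Int × Int) :=
  let s := starts.getD i 0
  let e := ebsGet ebs s
  match st.2 with
  | none => (st.1.insert s s, some (s, s, e))
  | some (cb, nb, ce) =>
    if ce < s then
      let nb' := nb + (ce - cb) + 1 + gap
      (st.1.insert s nb', some (s, nb', e))
    else
      (st.1.insert s (nb + (s - cb)), some (cb, nb, max ce e))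

def axis_map_set_from_intervals_py_alt (starts : List Int) (end_by_start : List (Int × Int)) (gap : Int) : List (Int × Int) :=
  if gap < 0 then []                                    -- ValueError; excluded by Pre_
  else if starts.length = 1 then [(starts.getD 0 0, starts.getD 0 0)]
  else
    let order := PySem.List.sorted2 (List.range starts.length)
        (fun i => starts.getD i 0) (fun i => ebsGet end_by_start (starts.getD i 0)) false
    let st := order.foldl (sweepStep starts end_by_start gap) (PySem.Dict.empty, none)
    st.1.items

-- ===== PRECONDITION & SPEC =====
-- Pre_ excludes exactly the inputs on which A raises: a negative gap (ValueError) and,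
-- when len(starts) ≥ 2, a start missing from end_by_start (KeyError).
def Pre_axis_map_set_from_intervals_py (starts : List Int) (end_by_start : List (Int × Int)) (gap : Int) : Prop :=
  0 ≤ gap ∧ (starts.length ≤ 1 ∨
    starts.all (fun s => (end_by_start.find? (fun p => p.1 == s)).isSome) = true)
instance (starts : List Int) (end_by_start : List (Int × Int)) (gap : Int) : Decidable (Pre_axis_map_set_from_intervals_py starts end_by_start gap) := by unfold Pre_axis_map_set_from_intervals_py; infer_instance

def pvWitness_axis_map_set_from_intervals_py : List Int × (List (Int × Int)) × Int :=
  ([0, 5], [(0, 1), (5, 6)], 2)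

def Spec_axis_map_set_from_intervals_py (starts : List Int) (end_by_start : List (Int × Int)) (gap : Int) (out : List (Int × Int)) : Prop := out = axis_map_set_from_intervals_py_alt starts end_by_start gap
instance (starts : List Int) (end_by_start : List (Int × Int)) (gap : Int) (out : List (Int × Int)) : Decidable (Spec_axis_map_set_from_intervals_py starts end_by_start gap out) := by unfold Spec_axis_map_set_from_intervals_py; infer_instance

-- ===== CLAIM (what is proved, stated in full; the proofs are below) =====
def Claim_equal_axis_map_set_from_intervals_py : Prop := ∀ (starts : List Int) (end_by_start : List (Int × Int)) (gap : Int), Dom_axis_map_set_from_intervals_py starts end_by_start gap → Pre_axis_map_set_from_intervals_py starts end_by_start gap → Spec_axis_map_set_from_intervals_py starts end_by_start gap (axis_map_set_from_intervals_py starts end_by_start gap)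

-- ===== LEMMAS AND PROOFS =====

-- ---- proof-side vocabulary: the sorted pair list and its overlap components ----

-- components fold, on (start, end) pairs
def groupsGo : List (Int × Int) → List (Int × Int) → Int → List (List (Int × Int))
  | [], cur, _ => [cur]
  | p :: t, cur, ce =>
    if p.1 ≤ ce then groupsGo t (cur ++ [p]) (max ce p.2)
    else cur :: groupsGo t [p] p.2

def groupsP : List (Int × Int) → List (List (Int × Int))
  | [] => []
  | p :: t => groupsGo t [p] p.2

def compB (g : List (Int × Int)) : Int := (g.headD (0, 0)).1
def compE : List (Int × Int) → Int
  | [] => 0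
  | p :: t => (t.map Prod.snd).foldl max p.2

-- the intended write list: per component, new base plus offset
def wIdeal (gap : Int) : List (List (Int × Int)) → Int → List (Int × Int)
  | [], _ => []
  | g :: t, nb =>
    g.map (fun p => (p.1, nb + (p.1 - compB g))) ++
      wIdeal gap t (nb + (compE g - compB g) + 1 + gap)

-- A's write list: values read from the base_map dict
def bmFold (gap : Int) : List (List (Int × Int)) → PySem.Dict Int Int → Int → PySem.Dict Int Int
  | [], d, _ => d
  | g :: t, d, nb => bmFold gap t (d.insert (compB g) nb) (nb + (compE g - compB g) + 1 + gap)

def wA (bm : PySem.Dict Int Int) (gs : List (List (Int × Int))) : List (Int × Int) :=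
  gs.flatMap (fun g => g.map (fun p => (p.1, bm.getD (compB g) 0 + (p.1 - compB g))))

-- B's write list: the sweep
def sweepW (gap : Int) : List (Int × Int) → Int → Int → Int → List (Int × Int)
  | [], _, _, _ => []
  | p :: t, cb, nb, ce =>
    if ce < p.1 then
      (p.1, nb + (ce - cb) + 1 + gap) :: sweepW gap t p.1 (nb + (ce - cb) + 1 + gap) p.2
    else
      (p.1, nb + (p.1 - cb)) :: sweepW gap t cb nb (max ce p.2)

-- last value written for a key
def lastVal : List (Int × Int) → Int → Option Int
  | [], _ => none
  | p :: t, k =>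
    match lastVal t k with
    | some v => some v
    | none => if p.1 = k then some p.2 else none

-- ---- small generic lemmas ----

theorem lastVal_append (u v : List (Int × Int)) (k : Int) :
    lastVal (u ++ v) k = match lastVal v k with | some w => some w | none => lastVal u k := by
  induction u with
  | nil => cases h : lastVal v k <;> simp [lastVal, h]
  | cons p t ih => simp only [List.cons_append, lastVal, ih]; cases lastVal v k <;> rfl

theorem lastVal_eq_none_iff (w : List (Int × Int)) (k : Int) :
    lastVal w k = none ↔ k ∉ w.map Prod.fst := by
  induction w with
  | nil => simp [lastVal]
  | cons p t ih =>
    cases h : lastVal t k with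
    | some v =>
      have hk : k ∈ t.map Prod.fst := by
        by_contra hk; simp [ih.mpr hk] at h
      simp [lastVal, h, hk]
    | none =>
      have hk : k ∉ t.map Prod.fst := ih.mp h
      by_cases he : p.1 = k
      · simp [lastVal, h, he, hk]
      · simp only [lastVal, h, List.map_cons, List.mem_cons]
        simp [he, hk]
        exact fun hh => he hh.symm

theorem lastVal_map_group (g : List (Int × Int)) (F : Int → Int) (k : Int) :
    lastVal (g.map (fun p => (p.1, F p.1))) k =
      if k ∈ g.map Prod.fst then some (F k) else none := by
  induction g with
  | nil => simp [lastVal]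
  | cons p t ih =>
    simp only [List.map_cons, lastVal, ih]
    by_cases h : k ∈ t.map Prod.fst
    · simp [h]
    · by_cases he : p.1 = k
      · simp [h, he]
      · simp [h, he, List.mem_cons]
        intro hk; exact absurd hk.symm he

theorem getD_foldl_insert_pairs (w : List (Int × Int)) (d : PySem.Dict Int Int) (k : Int) :
    (w.foldl (fun d p => d.insert p.1 p.2) d).getD k 0 =
      match lastVal w k with | some v => v | none => d.getD k 0 := by
  induction w generalizing d with
  | nil => simp [lastVal]
  | cons p t ih =>
    simp only [List.foldl_cons, lastVal, ih, PySem.Dict.getD_insert]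
    cases lastVal t k with
    | some v => rfl
    | none =>
      by_cases he : p.1 = k
      · simp [he]
      · simp [he, Ne.symm he]

theorem getD_foldl_insert_fun (l : List Int) (f : Int → Int) (d : PySem.Dict Int Int) (k : Int) :
    (l.foldl (fun d s => d.insert s (f s)) d).getD k 0 =
      if k ∈ l then f k else d.getD k 0 := by
  induction l generalizing d with
  | nil => simp
  | cons x t ih =>
    simp only [List.foldl_cons, ih, PySem.Dict.getD_insert, List.mem_cons]
    by_cases h : k ∈ t
    · simp [h]
    · by_cases he : k = x <;> simp [h, he]

theorem foldl_min_eq_self (t : List Int) (x : Int) (h : ∀ y ∈ t, x ≤ y) :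
    t.foldl min x = x := by
  induction t with
  | nil => rfl
  | cons y t ih =>
    have hxy : min x y = x := min_eq_left (h y (by simp))
    simp only [List.foldl_cons, hxy]
    exact ih (fun z hz => h z (by simp [hz]))

-- insertion sort produces a list pairwise-nondecreasing under any monotone reading of `before`
theorem pairwise_insertBy {α : Type} (before : α → α → Bool) (f : α → Int)
    (h1 : ∀ a b, before a b = true → f a ≤ f b)
    (h2 : ∀ a b, before a b = false → f b ≤ f a)
    (x : α) (acc : List α) (hp : acc.Pairwise (fun a b => f a ≤ f b)) :
    (PySem.List.insertBy before x acc).Pairwise (fun a b => f a ≤ f b) := by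
  induction acc with
  | nil => simp [PySem.List.insertBy]
  | cons y t ih =>
    rw [show PySem.List.insertBy before x (y :: t) =
        if before x y = true then x :: y :: t else y :: PySem.List.insertBy before x t from rfl]
    rcases List.pairwise_cons.mp hp with ⟨hy, ht⟩
    by_cases hb : before x y = true
    · rw [if_pos hb]
      refine List.pairwise_cons.mpr ⟨?_, hp⟩
      intro z hz
      rcases List.mem_cons.mp hz with rfl | hz
      · exact h1 _ _ hb
      · exact le_trans (h1 _ _ hb) (hy z hz)
    · rw [if_neg hb]
      refine List.pairwise_cons.mpr ⟨?_, ih ht⟩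
      intro z hz
      rcases (PySem.List.mem_insertBy _ _ _ _).mp hz with rfl | hz
      · exact h2 _ _ (by simpa using hb)
      · exact hy z hz

theorem pairwise_foldl_insertBy {α : Type} (before : α → α → Bool) (f : α → Int)
    (h1 : ∀ a b, before a b = true → f a ≤ f b)
    (h2 : ∀ a b, before a b = false → f b ≤ f a)
    (xs : List α) :
    (xs.foldl (fun acc x => PySem.List.insertBy before x acc) []).Pairwise
      (fun a b => f a ≤ f b) := by
  suffices h : ∀ acc, acc.Pairwise (fun a b => f a ≤ f b) →
      (xs.foldl (fun acc x => PySem.List.insertBy before x acc) acc).Pairwise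
        (fun a b => f a ≤ f b) by
    exact h [] (by simp)
  induction xs with
  | nil => intro acc h; simpa using h
  | cons x t ih =>
    intro acc h
    exact ih _ (pairwise_insertBy before f h1 h2 x acc h)

-- insertBy only compares x with members of the list
theorem insertBy_congr {α : Type} (b1 b2 : α → α → Bool) (x : α) (ys : List α)
    (h : ∀ y ∈ ys, b1 x y = b2 x y) :
    PySem.List.insertBy b1 x ys = PySem.List.insertBy b2 x ys := by
  induction ys with
  | nil => rfl
  | cons y t ih =>
    rw [show PySem.List.insertBy b1 x (y :: t) =
        if b1 x y = true then x :: y :: t else y :: PySem.List.insertBy b1 x t from rfl,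
      show PySem.List.insertBy b2 x (y :: t) =
        if b2 x y = true then x :: y :: t else y :: PySem.List.insertBy b2 x t from rfl,
      h y (by simp)]
    split
    · rfl
    · rw [ih (fun z hz => h z (by simp [hz]))]

theorem foldl_insertBy_congr_aux {α : Type} (b1 b2 : α → α → Bool) (l : List α) :
    ∀ acc : List α, (∀ x ∈ l, ∀ y ∈ acc, b1 x y = b2 x y) →
      (∀ x ∈ l, ∀ y ∈ l, b1 x y = b2 x y) →
      l.foldl (fun acc x => PySem.List.insertBy b1 x acc) acc =
        l.foldl (fun acc x => PySem.List.insertBy b2 x acc) acc := by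
  induction l with
  | nil => intro acc _ _; rfl
  | cons x t ih =>
    intro acc hacc hl
    simp only [List.foldl_cons]
    rw [insertBy_congr b1 b2 x acc (fun y hy => hacc x (by simp) y hy)]
    apply ih
    · intro z hz y hy
      rcases (PySem.List.mem_insertBy _ _ _ _).mp hy with rfl | hy
      · exact hl z (by simp [hz]) y (by simp)
      · exact hacc z (by simp [hz]) y hy
    · intro z hz y hy
      exact hl z (by simp [hz]) y (by simp [hy])

theorem foldl_insertBy_congr {α : Type} (b1 b2 : α → α → Bool) (xs : List α)
    (h : ∀ x ∈ xs, ∀ y ∈ xs, b1 x y = b2 x y) :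
    xs.foldl (fun acc x => PySem.List.insertBy b1 x acc) [] =
      xs.foldl (fun acc x => PySem.List.insertBy b2 x acc) [] :=
  foldl_insertBy_congr_aux b1 b2 xs [] (by simp) h

-- ---- structure of the groups ------ ---- structure of the groups ----

theorem groupsGo_flatten (t : List (Int × Int)) :
    ∀ cur ce, (groupsGo t cur ce).flatten = cur ++ t := by
  induction t with
  | nil => intro cur ce; simp [groupsGo]
  | cons p t ih =>
    intro cur ce
    obtain ⟨a, b⟩ := p
    rw [groupsGo]
    split
    · simp [ih]
    · simp [ih]

theorem groupsGo_ne_nil (t : List (Int × Int)) :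
    ∀ cur ce, cur ≠ [] → ∀ g ∈ groupsGo t cur ce, g ≠ [] := by
  induction t with
  | nil => intro cur ce hc g hg; simp [groupsGo] at hg; simpa [hg] using hc
  | cons p t ih =>
    intro cur ce hc g hg
    obtain ⟨a, b⟩ := p
    rw [groupsGo] at hg
    split at hg
    · exact ih _ _ (by simp) g hg
    · rcases List.mem_cons.mp hg with rfl | hg
      · exact hc
      · exact ih _ _ (by simp) g hg

theorem compB_mem (g : List (Int × Int)) (h : g ≠ []) : compB g ∈ g.map Prod.fst := by
  cases g with
  | nil => exact absurd rfl h
  | cons p t => simp [compB]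

theorem compE_append_singleton (g : List (Int × Int)) (h : g ≠ []) (q : Int × Int) :
    compE (g ++ [q]) = max (compE g) q.2 := by
  cases g with
  | nil => exact absurd rfl h
  | cons p t => simp [compE, List.foldl_append]

theorem compB_append_singleton (g : List (Int × Int)) (h : g ≠ []) (q : Int × Int) :
    compB (g ++ [q]) = compB g := by
  cases g with
  | nil => exact absurd rfl h
  | cons p t => simp [compB]

-- ---- B: the sweep writes are the ideal writes ----

theorem wIdeal_groupsGo (gap : Int) (t : List (Int × Int)) :
    ∀ cur nb, cur ≠ [] →
      wIdeal gap (groupsGo t cur (compE cur)) nb =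
        cur.map (fun p => (p.1, nb + (p.1 - compB cur))) ++
          sweepW gap t (compB cur) nb (compE cur) := by
  induction t with
  | nil => intro cur nb hc; simp [groupsGo, wIdeal, sweepW]
  | cons q t ih =>
    intro cur nb hc
    obtain ⟨a, b⟩ := q
    rw [groupsGo, sweepW]
    by_cases hle : a ≤ compE cur
    · rw [if_pos hle, if_neg (by omega)]
      have he : max (compE cur) b = compE (cur ++ [(a, b)]) :=
        (compE_append_singleton cur hc (a, b)).symm
      rw [he, ih (cur ++ [(a, b)]) nb (by simp),
        compB_append_singleton cur hc (a, b),
        compE_append_singleton cur hc (a, b)]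
      simp
    · rw [if_neg hle, if_pos (by omega)]
      rw [show wIdeal gap (cur :: groupsGo t [(a, b)] b) nb =
          cur.map (fun p => (p.1, nb + (p.1 - compB cur))) ++
            wIdeal gap (groupsGo t [(a, b)] b)
              (nb + (compE cur - compB cur) + 1 + gap) from rfl]
      have hIH := ih [(a, b)] (nb + (compE cur - compB cur) + 1 + gap) (by simp)
      rw [show compE [(a, b)] = b from rfl] at hIH
      rw [hIH]
      simp [compB]

-- ---- A: base_map lookups ----

theorem getD_bmFold_of_not_mem (gap : Int) (t : List (List (Int × Int)))
    (d : PySem.Dict Int Int) (nb b : Int) (h : b ∉ t.map compB) :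
    (bmFold gap t d nb).getD b 0 = d.getD b 0 := by
  induction t generalizing d nb with
  | nil => rfl
  | cons g t ih =>
    have h1 : b ≠ compB g ∧ b ∉ t.map compB := by simpa [not_or] using h
    rw [bmFold, ih _ _ h1.2, PySem.Dict.getD_insert, if_neg h1.1]

theorem map_fst_wIdeal (gap : Int) (gs : List (List (Int × Int))) :
    ∀ nb, (wIdeal gap gs nb).map Prod.fst = gs.flatten.map Prod.fst := by
  induction gs with
  | nil => intro nb; rfl
  | cons g t ih => intro nb; simp [wIdeal, ih]

theorem map_fst_wA (bm : PySem.Dict Int Int) (gs : List (List (Int × Int))) :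
    (wA bm gs).map Prod.fst = gs.flatten.map Prod.fst := by
  induction gs with
  | nil => rfl
  | cons g t ih => simp [wA, List.flatMap_cons, List.map_map, Function.comp_def]; simpa [wA] using ih

-- ---- the heart: A's writes and the ideal writes agree on last values ----

theorem compB_le_of_mem (g : List (Int × Int))
    (pw : (g.map Prod.fst).Pairwise (· ≤ ·)) (k : Int) (hk : k ∈ g.map Prod.fst) :
    compB g ≤ k := by
  cases g with
  | nil => simp at hk
  | cons p t0 =>
    rw [List.map_cons] at hk pw
    rcases List.mem_cons.mp hk with rfl | hk'
    · exact le_refl _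
    · exact (List.pairwise_cons.mp pw).1 k hk'

theorem lastVal_wA_eq_wIdeal (gap : Int) (gs : List (List (Int × Int))) :
    ∀ (d : PySem.Dict Int Int) (nb : Int),
      (∀ g ∈ gs, g ≠ []) →
      (gs.flatten.map Prod.fst).Pairwise (· ≤ ·) →
      ∀ k, lastVal (wA (bmFold gap gs d nb) gs) k = lastVal (wIdeal gap gs nb) k := by
  induction gs with
  | nil => intro d nb _ _ k; rfl
  | cons g t ih =>
    intro d nb hne hsor k
    have hgne : g ≠ [] := hne g (by simp)
    rw [List.flatten_cons, List.map_append] at hsor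
    obtain ⟨pwg, pwt, cross⟩ := List.pairwise_append.mp hsor
    have hIH := ih (d.insert (compB g) nb) (nb + (compE g - compB g) + 1 + gap)
      (fun g' hg' => hne g' (by simp [hg'])) pwt
    rw [show wA (bmFold gap (g :: t) d nb) (g :: t) =
        g.map (fun p => (p.1,
          (bmFold gap t (d.insert (compB g) nb) (nb + (compE g - compB g) + 1 + gap)).getD
            (compB g) 0 + (p.1 - compB g))) ++
          wA (bmFold gap t (d.insert (compB g) nb) (nb + (compE g - compB g) + 1 + gap)) t
        from rfl]
    rw [show wIdeal gap (g :: t) nb =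
        g.map (fun p => (p.1, nb + (p.1 - compB g))) ++
          wIdeal gap t (nb + (compE g - compB g) + 1 + gap) from rfl]
    rw [lastVal_append, lastVal_append, hIH k]
    cases hIv : lastVal (wIdeal gap t (nb + (compE g - compB g) + 1 + gap)) k with
    | some v => rfl
    | none =>
      show lastVal (g.map (fun p => (p.1,
          (bmFold gap t (d.insert (compB g) nb) (nb + (compE g - compB g) + 1 + gap)).getD
            (compB g) 0 + (p.1 - compB g)))) k
        = lastVal (g.map (fun p => (p.1, nb + (p.1 - compB g)))) k
      rw [lastVal_map_group g (fun s =>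
          (bmFold gap t (d.insert (compB g) nb) (nb + (compE g - compB g) + 1 + gap)).getD
            (compB g) 0 + (s - compB g)) k,
        lastVal_map_group g (fun s => nb + (s - compB g)) k]
      by_cases hk : k ∈ g.map Prod.fst
      · rw [if_pos hk, if_pos hk]
        have hknot : k ∉ t.flatten.map Prod.fst := by
          have h0 := (lastVal_eq_none_iff _ _).mp hIv
          rwa [map_fst_wIdeal] at h0
        have hnotmem : compB g ∉ t.map compB := by
          intro hmem
          rcases List.mem_map.mp hmem with ⟨g', hg', hbg⟩
          have h1 : compB g ∈ t.flatten.map Prod.fst := by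
            rcases List.mem_map.mp (compB_mem g' (hne g' (by simp [hg']))) with ⟨p, hp, hp1⟩
            exact List.mem_map.mpr ⟨p, List.mem_flatten.mpr ⟨g', hg', hp⟩, by rw [hp1, hbg]⟩
          have h2 : k ≤ compB g := cross k hk _ h1
          have h3 : compB g ≤ k := compB_le_of_mem g pwg k hk
          exact hknot (by rw [show k = compB g from le_antisymm h2 h3]; exact h1)
        rw [getD_bmFold_of_not_mem gap t _ _ (compB g) hnotmem,
          PySem.Dict.getD_insert, if_pos rfl]
      · rw [if_neg hk, if_neg hk]


-- ---- bridging the ports to the group vocabulary ----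

def pfA (intervals : List (Int × Int)) (i : Nat) : Int × Int := intervals.getD i (0, 0)

def pfB (starts : List Int) (ebs : List (Int × Int)) (i : Nat) : Int × Int :=
  (starts.getD i 0, ebsGet ebs (starts.getD i 0))

def ordB (starts : List Int) (ebs : List (Int × Int)) : List Nat :=
  PySem.List.sorted2 (List.range starts.length)
    (fun i => starts.getD i 0) (fun i => ebsGet ebs (starts.getD i 0)) false

def PP (starts : List Int) (ebs : List (Int × Int)) : List (Int × Int) :=
  (ordB starts ebs).map (pfB starts ebs)

def offD (g : List (Int × Int)) : PySem.Dict Int Int :=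
  (g.map Prod.fst).foldl (fun d s => d.insert s (s - compB g)) PySem.Dict.empty

def infoG (g : List (Int × Int)) : Int × Int × List Int × PySem.Dict Int Int :=
  (compB g, compE g, g.map Prod.fst, offD g)

def stepBP (gap : Int) (st : PySem.Dict Int Int × Option (Int × Int × Int)) (p : Int × Int) :
    PySem.Dict Int Int × Option (Int × Int × Int) :=
  match st.2 with
  | none => (st.1.insert p.1 p.1, some (p.1, p.1, p.2))
  | some (cb, nb, ce) =>
    if ce < p.1 then
      (st.1.insert p.1 (nb + (ce - cb) + 1 + gap), some (p.1, nb + (ce - cb) + 1 + gap, p.2))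
    else
      (st.1.insert p.1 (nb + (p.1 - cb)), some (cb, nb, max ce p.2))

theorem getD_map_intervals (starts : List Int) (ebs : List (Int × Int)) (i : Nat)
    (h : i < starts.length) :
    (starts.map (fun s => (s, ebsGet ebs s))).getD i (0, 0) =
      (starts.getD i 0, ebsGet ebs (starts.getD i 0)) := by
  simp [List.getD_eq_getElem?_getD, List.getElem?_map, List.getElem?_eq_getElem h]

theorem fst_pfA (starts : List Int) (ebs : List (Int × Int)) (i : Nat) :
    (pfA (starts.map (fun s => (s, ebsGet ebs s))) i).1 = starts.getD i 0 := by
  by_cases h : i < starts.length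
  · rw [pfA, getD_map_intervals starts ebs i h]
  · rw [pfA, List.getD_eq_getElem?_getD, List.getD_eq_getElem?_getD,
      List.getElem?_eq_none (by simpa using le_of_not_gt h),
      List.getElem?_eq_none (by simpa using le_of_not_gt h)]
    rfl

theorem sorted2_unfold (n : Nat) (k1 k2 : Nat → Int) :
    PySem.List.sorted2 (List.range n) k1 k2 false =
      (List.range n).foldl (fun acc x => PySem.List.insertBy
        (fun a b => decide (k1 a < k1 b) || (!decide (k1 b < k1 a) && decide (k2 a < k2 b)))
        x acc) [] := rfl

-- A's sort order equals B's
theorem orderA_eq_ordB (starts : List Int) (ebs : List (Int × Int)) :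
    PySem.List.sorted2 (List.range (starts.map (fun s => (s, ebsGet ebs s))).length)
      (fun i => ((starts.map (fun s => (s, ebsGet ebs s))).getD i (0, 0)).1)
      (fun i => ((starts.map (fun s => (s, ebsGet ebs s))).getD i (0, 0)).2) false
    = ordB starts ebs := by
  rw [List.length_map, ordB, sorted2_unfold, sorted2_unfold]
  apply foldl_insertBy_congr
  intro x hx y hy
  rw [List.mem_range] at hx hy
  rw [getD_map_intervals starts ebs x hx, getD_map_intervals starts ebs y hy]

theorem mem_ordB (starts : List Int) (ebs : List (Int × Int)) (i : Nat)
    (h : i ∈ ordB starts ebs) : i < starts.length := by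
  have := (PySem.List.sorted2_perm (List.range starts.length)
    (fun i => starts.getD i 0) (fun i => ebsGet ebs (starts.getD i 0)) false).mem_iff.mp h
  simpa using this

theorem length_ordB (starts : List Int) (ebs : List (Int × Int)) :
    (ordB starts ebs).length = starts.length := by
  simpa using (PySem.List.sorted2_perm (List.range starts.length)
    (fun i => starts.getD i 0) (fun i => ebsGet ebs (starts.getD i 0)) false).length_eq

theorem pairwise_fst_PP (starts : List Int) (ebs : List (Int × Int)) :
    ((PP starts ebs).map Prod.fst).Pairwise (· ≤ ·) := by
  rw [PP, List.map_map]
  rw [show Prod.fst ∘ pfB starts ebs = fun i => starts.getD i 0 from rfl]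
  rw [List.pairwise_map, ordB, sorted2_unfold]
  apply pairwise_foldl_insertBy _ (fun i => starts.getD i 0)
  · intro a b h
    simp only [Bool.or_eq_true, Bool.and_eq_true, Bool.not_eq_eq_eq_not, Bool.not_true,
      decide_eq_true_eq, decide_eq_false_iff_not] at h
    rcases h with h | ⟨h, _⟩ <;> omega
  · intro a b h
    simp only [Bool.or_eq_false_iff, decide_eq_false_iff_not] at h
    have := h.1
    omega

theorem snd_PP (starts : List Int) (ebs : List (Int × Int)) :
    ∀ p ∈ PP starts ebs, p.2 = ebsGet ebs p.1 := by
  intro p hp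
  rcases List.mem_map.mp hp with ⟨i, _, rfl⟩
  rfl

theorem groupsGo_cons (p : Int × Int) (t cur : List (Int × Int)) (ce : Int) :
    groupsGo (p :: t) cur ce =
      if p.1 ≤ ce then groupsGo t (cur ++ [p]) (max ce p.2)
      else cur :: groupsGo t [p] p.2 := rfl

-- the components fold, read off as groups of interval pairs
theorem compsGoLem (intervals : List (Int × Int)) (l : List Nat) :
    ∀ comps cur ce,
      (((l.foldl (compStep intervals) (comps, cur, some ce)).1 ++
          [(l.foldl (compStep intervals) (comps, cur, some ce)).2.1]).map
            (List.map (pfA intervals))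
        = comps.map (List.map (pfA intervals)) ++
            groupsGo (l.map (pfA intervals)) (cur.map (pfA intervals)) ce)
      ∧ ((l.foldl (compStep intervals) (comps, cur, some ce)).2.2).isSome := by
  induction l with
  | nil =>
    intro comps cur ce
    refine ⟨?_, rfl⟩
    simp [groupsGo]
  | cons i t ih =>
    intro comps cur ce
    rw [List.foldl_cons,
      show compStep intervals (comps, cur, some ce) i =
        (if (pfA intervals i).1 ≤ ce then (comps, cur ++ [i], some (max ce (pfA intervals i).2))
         else (comps ++ [cur], [i], some (pfA intervals i).2)) from rfl]
    rw [show (i :: t).map (pfA intervals) =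
        pfA intervals i :: t.map (pfA intervals) from rfl, groupsGo_cons]
    by_cases h : (pfA intervals i).1 ≤ ce
    · rw [if_pos h, if_pos h]
      obtain ⟨h1, h2⟩ := ih comps (cur ++ [i]) (max ce (pfA intervals i).2)
      refine ⟨?_, h2⟩
      rw [h1]
      simp
    · rw [if_neg h, if_neg h]
      obtain ⟨h1, h2⟩ := ih (comps ++ [cur]) [i] (pfA intervals i).2
      refine ⟨?_, h2⟩
      rw [h1]
      simp

theorem components_eq (starts : List Int) (ebs : List (Int × Int))
    (h2 : 2 ≤ starts.length) :
    (components1d (starts.map (fun s => (s, ebsGet ebs s)))).map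
        (List.map (pfA (starts.map (fun s => (s, ebsGet ebs s)))))
      = groupsP ((ordB starts ebs).map (pfA (starts.map (fun s => (s, ebsGet ebs s))))) := by
  have hne : ∃ i0 rest, ordB starts ebs = i0 :: rest := by
    cases h : ordB starts ebs with
    | nil => exfalso; have := length_ordB starts ebs; rw [h] at this; simp at this; omega
    | cons i0 rest => exact ⟨i0, rest, rfl⟩
  obtain ⟨i0, rest, hord⟩ := hne
  rw [show components1d (starts.map (fun s => (s, ebsGet ebs s))) =
      (fun st : List (List Nat) × List Nat × Option Int =>
        match st.2.2 with
        | none => st.1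
        | some _ => st.1 ++ [st.2.1])
      ((PySem.List.sorted2 (List.range (starts.map (fun s => (s, ebsGet ebs s))).length)
        (fun i => ((starts.map (fun s => (s, ebsGet ebs s))).getD i (0, 0)).1)
        (fun i => ((starts.map (fun s => (s, ebsGet ebs s))).getD i (0, 0)).2) false).foldl
          (compStep (starts.map (fun s => (s, ebsGet ebs s)))) ([], [], none)) from rfl]
  rw [orderA_eq_ordB starts ebs, hord, List.foldl_cons,
    show compStep (starts.map (fun s => (s, ebsGet ebs s))) ([], [], none) i0 =
      ([], [i0], some (pfA (starts.map (fun s => (s, ebsGet ebs s))) i0).2) from rfl]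
  obtain ⟨h1, h2⟩ := compsGoLem (starts.map (fun s => (s, ebsGet ebs s))) rest [] [i0]
    (pfA (starts.map (fun s => (s, ebsGet ebs s))) i0).2
  cases hsome : ((rest.foldl (compStep (starts.map (fun s => (s, ebsGet ebs s))))
      ([], [i0], some (pfA (starts.map (fun s => (s, ebsGet ebs s))) i0).2)).2.2) with
  | none => rw [hsome] at h2; simp at h2
  | some ce' =>
    simp only [hsome]
    rw [List.map_cons, groupsP]
    simpa using h1

theorem PA_eq_PP (starts : List Int) (ebs : List (Int × Int)) :
    (ordB starts ebs).map (pfA (starts.map (fun s => (s, ebsGet ebs s)))) = PP starts ebs := by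
  apply List.map_congr_left
  intro i hi
  rw [pfA, getD_map_intervals starts ebs i (mem_ordB starts ebs i hi)]
  rfl

-- groups facts
theorem groupsP_flatten (P : List (Int × Int)) : (groupsP P).flatten = P := by
  cases P with
  | nil => rfl
  | cons p t => rw [groupsP]; rw [groupsGo_flatten]; rfl

theorem groupsP_ne_nil' (P : List (Int × Int)) (g : List (Int × Int))
    (hg : g ∈ groupsP P) : g ≠ [] := by
  cases P with
  | nil => cases hg
  | cons p t => exact groupsGo_ne_nil t [p] p.2 (by simp) g hg

theorem groupsGo_head (t : List (Int × Int)) :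
    ∀ cur ce, ∃ u gs', groupsGo t cur ce = (cur ++ u) :: gs' := by
  induction t with
  | nil => intro cur ce; exact ⟨[], [], by simp [groupsGo]⟩
  | cons p t ih =>
    intro cur ce
    rw [groupsGo]
    by_cases h : p.1 ≤ ce
    · rw [if_pos h]
      obtain ⟨u, gs', hu⟩ := ih (cur ++ [p]) (max ce p.2)
      exact ⟨p :: u, gs', by simpa using hu⟩
    · rw [if_neg h]
      exact ⟨[], groupsGo t [p] p.2, by simp⟩

-- per-group rewriting of infoFun
theorem infoFun_eq_infoG (ebs : List (Int × Int)) (g : List (Int × Int)) (hne : g ≠ [])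
    (hpw : (g.map Prod.fst).Pairwise (· ≤ ·)) (hsnd : ∀ p ∈ g, p.2 = ebsGet ebs p.1) :
    infoFun ebs (g.map Prod.fst) = infoG g := by
  cases g with
  | nil => exact absurd rfl hne
  | cons p t =>
    rw [List.map_cons] at hpw
    have hpw' := List.pairwise_cons.mp hpw
    have hbase : (PySem.List.min? ((p :: t).map Prod.fst) (fun y => y)).getD 0 = p.1 := by
      rw [List.map_cons, PySem.List.min?_id_cons, Option.getD_some,
        foldl_min_eq_self _ _ hpw'.1]
    have hmap : ((p :: t).map Prod.fst).map (fun s => ebsGet ebs s) = (p :: t).map Prod.snd := by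
      rw [List.map_map]
      exact List.map_congr_left (fun q hq => (hsnd q hq).symm)
    have hend : (PySem.List.max? (((p :: t).map Prod.fst).map (fun s => ebsGet ebs s))
        (fun y => y)).getD 0 = compE (p :: t) := by
      rw [hmap, List.map_cons, PySem.List.max?_id_cons, Option.getD_some]; rfl
    simp only [infoFun, infoG]
    rw [hbase, hend]
    simp [compB, offD]

-- base_map fold = bmFold
theorem bm_fold_eq (gap : Int) (L : List (List (Int × Int))) :
    ∀ (d : PySem.Dict Int Int) (pe : Int),
      ((L.map infoG).foldl (bmStep gap) (d, pe)).1 = bmFold gap L d (pe + 1 + gap) := by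
  induction L with
  | nil => intro d pe; rfl
  | cons g T ih =>
    intro d pe
    rw [List.map_cons, List.foldl_cons,
      show bmStep gap (d, pe) (infoG g) =
        (d.insert (compB g) (pe + 1 + gap), pe + 1 + gap + (compE g - compB g)) from rfl,
      ih, bmFold]

-- rendering fold = flat write list fold
theorem render_fold_eq (bm : PySem.Dict Int Int) (L : List (Int × Int × List Int × PySem.Dict Int Int)) :
    ∀ out : PySem.Dict Int Int,
      L.foldl (renderStep bm) out =
        (L.flatMap (fun info => info.2.2.1.map
            (fun s => (s, bm.getD info.1 0 + info.2.2.2.getD s 0)))).foldl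
          (fun d p => d.insert p.1 p.2) out := by
  induction L with
  | nil => intro out; rfl
  | cons info T ih =>
    intro out
    rw [List.foldl_cons, List.flatMap_cons, List.foldl_append, ih,
      show renderStep bm out info =
        (info.2.2.1.map (fun s => (s, bm.getD info.1 0 + info.2.2.2.getD s 0))).foldl
          (fun d p => d.insert p.1 p.2) out
      from by rw [renderStep, List.foldl_map]]

-- B's sweep fold = sweep write list fold
theorem sweep_fold_eq (gap : Int) (l : List (Int × Int)) :
    ∀ (out : PySem.Dict Int Int) cb nb ce,
      (l.foldl (stepBP gap) (out, some (cb, nb, ce))).1 =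
        (sweepW gap l cb nb ce).foldl (fun d p => d.insert p.1 p.2) out := by
  induction l with
  | nil => intro out cb nb ce; rfl
  | cons p t ih =>
    intro out cb nb ce
    rw [List.foldl_cons, sweepW]
    by_cases h : ce < p.1
    · rw [if_pos h, show stepBP gap (out, some (cb, nb, ce)) p =
        (out.insert p.1 (nb + (ce - cb) + 1 + gap),
          some (p.1, nb + (ce - cb) + 1 + gap, p.2)) from by
          rw [stepBP]; simp [if_pos h], ih, List.foldl_cons]
    · rw [if_neg h, show stepBP gap (out, some (cb, nb, ce)) p =
        (out.insert p.1 (nb + (p.1 - cb)), some (cb, nb, max ce p.2)) from by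
          rw [stepBP]; simp [if_neg h], ih, List.foldl_cons]

-- final dictionaries from write lists with equal key sequences and equal last writes
theorem items_fold_eq (w1 w2 : List (Int × Int))
    (hf : w1.map Prod.fst = w2.map Prod.fst)
    (hl : ∀ k, lastVal w1 k = lastVal w2 k) :
    (w1.foldl (fun d p => d.insert p.1 p.2) (PySem.Dict.empty : PySem.Dict Int Int)).items =
      (w2.foldl (fun d p => d.insert p.1 p.2) (PySem.Dict.empty : PySem.Dict Int Int)).items := by
  have hnd1 : (w1.foldl (fun d p => d.insert p.1 p.2)
      (PySem.Dict.empty : PySem.Dict Int Int)).keys.Nodup :=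
    PySem.Dict.nodup_keys_foldl_insert_key w1 Prod.fst (fun _ p => p.2) _ (by simp)
  have hnd2 : (w2.foldl (fun d p => d.insert p.1 p.2)
      (PySem.Dict.empty : PySem.Dict Int Int)).keys.Nodup :=
    PySem.Dict.nodup_keys_foldl_insert_key w2 Prod.fst (fun _ p => p.2) _ (by simp)
  rw [PySem.Dict.items_eq_map_keys _ hnd1 0, PySem.Dict.items_eq_map_keys _ hnd2 0]
  have hk1 := PySem.Dict.keys_foldl_insert_key w1 Prod.fst
    (fun _ p => p.2) (PySem.Dict.empty : PySem.Dict Int Int)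
  have hk2 := PySem.Dict.keys_foldl_insert_key w2 Prod.fst
    (fun _ p => p.2) (PySem.Dict.empty : PySem.Dict Int Int)
  rw [hk1, hk2, hf]
  apply List.map_congr_left
  intro k _
  rw [getD_foldl_insert_pairs, getD_foldl_insert_pairs, hl k]


theorem flatMap_congr_mem {α β : Type} (l : List α) (f g : α → List β)
    (h : ∀ a ∈ l, f a = g a) : l.flatMap f = l.flatMap g := by
  rw [List.flatMap_def, List.flatMap_def, List.map_congr_left h]

theorem main_case (starts : List Int) (ebs : List (Int × Int)) (gap : Int)
    (hgneg : ¬ gap < 0) (h2 : 2 ≤ starts.length) :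
    axis_map_set_from_intervals_py starts ebs gap =
      axis_map_set_from_intervals_py_alt starts ebs gap := by
  have hne1 : ¬ starts.length = 1 := by omega
  have hnemp : starts.isEmpty = false := by
    cases starts with
    | nil => simp at h2
    | cons a t => rfl
  -- decompose the sorted pair list and its groups
  obtain ⟨p0, Pt, hP⟩ : ∃ p0 Pt, PP starts ebs = p0 :: Pt := by
    cases h : PP starts ebs with
    | nil =>
      exfalso
      have hl : (PP starts ebs).length = starts.length := by
        rw [PP, List.length_map, length_ordB]
      rw [h] at hl; simp at hl; omega
    | cons p0 Pt => exact ⟨p0, Pt, rfl⟩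
  obtain ⟨u, gs', hGd⟩ : ∃ u gs', groupsP (PP starts ebs) = (p0 :: u) :: gs' := by
    rw [hP, show groupsP (p0 :: Pt) = groupsGo Pt [p0] p0.2 from rfl]
    obtain ⟨u, gs', hu⟩ := groupsGo_head Pt [p0] p0.2
    exact ⟨u, gs', by simpa using hu⟩
  -- structural facts about the groups
  have hflat : (groupsP (PP starts ebs)).flatten = PP starts ebs := groupsP_flatten _
  have hgne : ∀ g ∈ groupsP (PP starts ebs), g ≠ [] := groupsP_ne_nil' _
  have hpwflat : ((groupsP (PP starts ebs)).flatten.map Prod.fst).Pairwise (· ≤ ·) := by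
    rw [hflat]; exact pairwise_fst_PP starts ebs
  have hpwflat2 := hpwflat
  rw [List.map_flatten] at hpwflat2
  obtain ⟨hin, hcross⟩ := List.pairwise_flatten.mp hpwflat2
  have hgpw : ∀ g ∈ groupsP (PP starts ebs), (g.map Prod.fst).Pairwise (· ≤ ·) :=
    fun g hg => hin _ (List.mem_map_of_mem hg)
  have hgsnd : ∀ g ∈ groupsP (PP starts ebs), ∀ p ∈ g, p.2 = ebsGet ebs p.1 :=
    fun g hg p hp => snd_PP starts ebs p (by
      rw [← hflat]; exact List.mem_flatten.mpr ⟨g, hg, hp⟩)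
  rw [List.pairwise_map] at hcross
  have hGpwB : (groupsP (PP starts ebs)).Pairwise (fun g1 g2 => compB g1 ≤ compB g2) := by
    refine hcross.imp_of_mem ?_
    intro g1 g2 h1 h2' hr
    exact hr (compB g1) (compB_mem g1 (hgne g1 h1)) (compB g2) (compB_mem g2 (hgne g2 h2'))
  -- A's comps, read as groups
  have hcomps := components_eq starts ebs h2
  rw [PA_eq_PP] at hcomps
  -- A's comp_info list
  have hCI : (((components1d (starts.map (fun s => (s, ebsGet ebs s)))).map
        (fun comp => comp.map (fun i => starts.getD i 0))).foldl
          (fun acc ss => acc ++ [infoFun ebs ss]) [])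
      = (groupsP (PP starts ebs)).map infoG := by
    rw [PySem.List.foldl_append_singleton_eq_map (infoFun ebs), List.nil_append]
    have hcs : (components1d (starts.map (fun s => (s, ebsGet ebs s)))).map
        (fun comp => comp.map (fun i => starts.getD i 0))
        = (groupsP (PP starts ebs)).map (List.map Prod.fst) := by
      rw [← hcomps, List.map_map]
      apply List.map_congr_left
      intro comp _
      show comp.map (fun i => starts.getD i 0) =
        (comp.map (pfA (starts.map (fun s => (s, ebsGet ebs s))))).map Prod.fst
      rw [List.map_map]
      exact List.map_congr_left (fun i _ => (fst_pfA starts ebs i).symm)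
    rw [hcs, List.map_map]
    exact List.map_congr_left (fun g hg =>
      infoFun_eq_infoG ebs g (hgne g hg) (hgpw g hg) (hgsnd g hg))
  have hsorted : PySem.List.sorted ((groupsP (PP starts ebs)).map infoG) (fun x => x.1) false
      = (groupsP (PP starts ebs)).map infoG := by
    apply PySem.List.sorted_eq_self_of_pairwise
    rw [List.pairwise_map]
    exact hGpwB
  -- A's whole body
  have hA1 : axis_map_set_from_intervals_py starts ebs gap =
      (match PySem.List.sorted
          ((((components1d (starts.map (fun s => (s, ebsGet ebs s)))).map
            (fun comp => comp.map (fun i => starts.getD i 0))).foldl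
              (fun acc ss => acc ++ [infoFun ebs ss]) [])) (fun x => x.1) false with
       | [] => ([] : List (Int × Int))
       | info0 :: rest =>
          ((PySem.List.sorted
            ((((components1d (starts.map (fun s => (s, ebsGet ebs s)))).map
              (fun comp => comp.map (fun i => starts.getD i 0))).foldl
                (fun acc ss => acc ++ [infoFun ebs ss]) [])) (fun x => x.1) false).foldl
            (renderStep ((rest.foldl (bmStep gap)
              (PySem.Dict.empty.insert info0.1 info0.1, info0.2.1)).1)) PySem.Dict.empty).items) := by
    unfold axis_map_set_from_intervals_py
    rw [if_neg hgneg, hnemp]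
    rw [if_neg (by simp)]
    rw [if_neg hne1]
  rw [hCI, hsorted, hGd, List.map_cons] at hA1
  have hA2 : axis_map_set_from_intervals_py starts ebs gap =
      ((infoG (p0 :: u) :: gs'.map infoG).foldl
        (renderStep (((gs'.map infoG).foldl (bmStep gap)
          (PySem.Dict.empty.insert (compB (p0 :: u)) (compB (p0 :: u)), compE (p0 :: u))).1))
        PySem.Dict.empty).items := hA1
  -- base_map is bmFold
  have hbm : (((gs'.map infoG).foldl (bmStep gap)
      (PySem.Dict.empty.insert (compB (p0 :: u)) (compB (p0 :: u)), compE (p0 :: u))).1)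
      = bmFold gap ((p0 :: u) :: gs') PySem.Dict.empty (compB (p0 :: u)) := by
    rw [bm_fold_eq gap gs']
    rw [show bmFold gap ((p0 :: u) :: gs') PySem.Dict.empty (compB (p0 :: u)) =
      bmFold gap gs' (PySem.Dict.empty.insert (compB (p0 :: u)) (compB (p0 :: u)))
        (compB (p0 :: u) + (compE (p0 :: u) - compB (p0 :: u)) + 1 + gap) from rfl]
    rw [show compB (p0 :: u) + (compE (p0 :: u) - compB (p0 :: u)) + 1 + gap
      = compE (p0 :: u) + 1 + gap from by ring]
  rw [hbm] at hA2
  -- rendering fold is the A write list fold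
  have hrender : (infoG (p0 :: u) :: gs'.map infoG).foldl
      (renderStep (bmFold gap ((p0 :: u) :: gs') PySem.Dict.empty (compB (p0 :: u))))
      PySem.Dict.empty
      = (wA (bmFold gap ((p0 :: u) :: gs') PySem.Dict.empty (compB (p0 :: u)))
          ((p0 :: u) :: gs')).foldl (fun d p => d.insert p.1 p.2) PySem.Dict.empty := by
    rw [show (infoG (p0 :: u) :: gs'.map infoG) = ((p0 :: u) :: gs').map infoG from rfl]
    rw [render_fold_eq, List.flatMap_map]
    congr 1
    rw [wA]
    apply flatMap_congr_mem
    intro g hg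
    rw [show (infoG g).2.2.1 = g.map Prod.fst from rfl, List.map_map]
    apply List.map_congr_left
    intro p hp
    show (p.1, (bmFold gap ((p0 :: u) :: gs') PySem.Dict.empty (compB (p0 :: u))).getD
        (compB g) 0 + (offD g).getD p.1 0) = _
    rw [offD, getD_foldl_insert_fun, if_pos (List.mem_map_of_mem hp)]
  rw [hrender] at hA2
  -- B's whole body
  have hB1 : axis_map_set_from_intervals_py_alt starts ebs gap =
      (((ordB starts ebs).foldl (sweepStep starts ebs gap) (PySem.Dict.empty, none)).1).items := by
    unfold axis_map_set_from_intervals_py_alt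
    rw [if_neg hgneg, if_neg hne1]
    rfl
  have hsw : sweepStep starts ebs gap = fun st i => stepBP gap st (pfB starts ebs i) := rfl
  rw [hsw, ← List.foldl_map,
    show (ordB starts ebs).map (pfB starts ebs) = PP starts ebs from rfl, hP,
    List.foldl_cons,
    show stepBP gap ((PySem.Dict.empty : PySem.Dict Int Int), none) p0 =
      (PySem.Dict.empty.insert p0.1 p0.1, some (p0.1, p0.1, p0.2)) from rfl,
    sweep_fold_eq] at hB1
  -- the sweep writes are the ideal writes
  have hwI : wIdeal gap (groupsP (PP starts ebs)) p0.1 =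
      (p0.1, p0.1) :: sweepW gap Pt p0.1 p0.1 p0.2 := by
    rw [hP]
    have h := wIdeal_groupsGo gap Pt [p0] p0.1 (by simp)
    refine h.trans ?_
    show (p0.1, p0.1 + (p0.1 - p0.1)) :: sweepW gap Pt p0.1 p0.1 p0.2 = _
    rw [show p0.1 + (p0.1 - p0.1) = p0.1 from by ring]
  -- finish
  rw [hA2, hB1]
  rw [show (sweepW gap Pt p0.1 p0.1 p0.2).foldl (fun d p => d.insert p.1 p.2)
      (PySem.Dict.empty.insert p0.1 p0.1)
    = ((p0.1, p0.1) :: sweepW gap Pt p0.1 p0.1 p0.2).foldl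
        (fun d p => d.insert p.1 p.2) PySem.Dict.empty from rfl]
  rw [← hwI, ← hGd]
  apply items_fold_eq
  · rw [map_fst_wA, map_fst_wIdeal]
  · intro k
    have := lastVal_wA_eq_wIdeal gap (groupsP (PP starts ebs)) PySem.Dict.empty p0.1 hgne hpwflat k
    rw [hGd] at this ⊢
    exact this

-- ===== VERDICT (by name: the statement is the Claim_ definition above) =====
theorem axis_map_set_from_intervals_py_spec : Claim_equal_axis_map_set_from_intervals_py := by
  intro starts ebs gap _ hpre
  unfold Spec_axis_map_set_from_intervals_py
  obtain ⟨hg, _⟩ := hpre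
  have hgneg : ¬ gap < 0 := by omega
  by_cases hlen2 : 2 ≤ starts.length
  · exact main_case starts ebs gap hgneg hlen2
  · cases starts with
    | nil =>
      simp only [axis_map_set_from_intervals_py, axis_map_set_from_intervals_py_alt,
        if_neg hgneg]
      rfl
    | cons s rest =>
      cases rest with
      | nil =>
        simp only [axis_map_set_from_intervals_py, axis_map_set_from_intervals_py_alt,
          if_neg hgneg]
        rfl
      | cons s2 rest2 =>
        exfalso
        exact hlen2 (by simp only [List.length_cons]; omega)
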